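-- pv_equiv track=rewrite | github.com/schans/aoc2021 | 18/snailfish.py | tsplit
-- ===== SOURCE A (Python) =====
-- from typing import Tuple
-- from collections import deque
--
-- def tsplit(toks: deque) -> Tuple[bool, deque]:
--     si = -1
--     for i in range(len(toks)):
--         if len(toks[i]) > 1:
--             si = i
--             break
--     if si == -1:
--         return False, toks
--
--     ntoks = deque()
--     for i in range(0, si):
--         ntoks.append(toks[i])
--
--     v = int(toks[si])
--     l = v//2
--     r = v - l
--     ntoks.append('[')
--     ntoks.append(str(l))
--     ntoks.append(',')
--     ntoks.append(str(r))
--     ntoks.append(']')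
--
--     for i in range(si+1, len(toks)):
--         ntoks.append(toks[i])
--
--     return True, ntoks
-- ===== SOURCE B (Python) =====
-- from collections import deque
--
--
-- def _go(ts):
--     # recursion on list structure: None if no multi-digit token,
--     # else the rewritten token list built as the recursion unwinds
--     if not ts:
--         return None
--     t, rest = ts[0], ts[1:]
--     if len(t) > 1:
--         v = int(t)
--         l = v // 2
--         return ['[', str(l), ',', str(v - l), ']'] + rest
--     r = _go(rest)
--     return None if r is None else [t] + r
--
--
-- def tsplit(toks):
--     res = _go(list(toks))
--     if res is None:
--         return False, toks
--     return True, deque(res)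
-- ===== Notes on version B (the rewrite author's own statement) =====
-- stated objective: alternative
-- what changed: Replaced A's iterative three-phase index machinery (scan for split index, copy-prefix loop, copy-suffix loop) with a structural recursion returning Optional[list]: the recursion descends to the first multi-digit token, replaces it, and rebuilds the suffix-preserving result back-to-front as the calls unwind.
import Mathlib
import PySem

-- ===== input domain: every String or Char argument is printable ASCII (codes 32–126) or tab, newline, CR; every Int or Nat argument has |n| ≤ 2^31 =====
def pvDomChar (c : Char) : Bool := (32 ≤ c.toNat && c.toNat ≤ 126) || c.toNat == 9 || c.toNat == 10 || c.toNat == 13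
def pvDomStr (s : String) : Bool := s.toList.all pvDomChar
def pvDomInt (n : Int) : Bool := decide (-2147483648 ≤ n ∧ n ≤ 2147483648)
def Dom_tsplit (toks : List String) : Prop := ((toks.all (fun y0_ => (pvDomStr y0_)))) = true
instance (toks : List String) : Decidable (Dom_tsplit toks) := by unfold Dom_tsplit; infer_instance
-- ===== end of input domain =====

-- B replaces A's iterative scan-index-then-rebuild with a structural recursion returning
-- Option (List String), rebuilding the result as the recursion unwinds; same cost, different decomposition.
-- ===== PORT A =====
-- A's first loop: index of the first token of length > 1 (Python's si; none = -1)
def tsplitSi : List String → Option Nat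
  | [] => none
  | t :: rest => if PySem.Str.len t > 1 then some 0 else (tsplitSi rest).map (· + 1)

def tsplit (toks : List String) : Bool × List String :=
  match tsplitSi toks with
  | none => (false, toks)
  | some si =>
    -- int(toks[si]) : Pre_ guarantees ofStr? is some; getD 0 is exact on Pre_
    let v := (PySem.Int.ofStr? (toks.getD si "")).getD 0
    let l := PySem.Int.floordiv v 2
    let r := v - l
    (true, toks.take si
      ++ ["[", PySem.Int.toStr l, ",", PySem.Int.toStr r, "]"]
      ++ toks.drop (si + 1))

-- ===== PORT B =====
-- B's helper _go: recursion on the list, none = no multi-digit token found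
def tsplitGo : List String → Option (List String)
  | [] => none
  | t :: rest =>
    if PySem.Str.len t > 1 then
      -- int(t) : Pre_ guarantees ofStr? is some; getD 0 is exact on Pre_
      let v := (PySem.Int.ofStr? t).getD 0
      let l := PySem.Int.floordiv v 2
      some (["[", PySem.Int.toStr l, ",", PySem.Int.toStr (v - l), "]"] ++ rest)
    else (tsplitGo rest).map (t :: ·)

def tsplit_alt (toks : List String) : Bool × List String :=
  match tsplitGo toks with
  | none => (false, toks)
  | some res => (true, res)

-- ===== PRECONDITION & SPEC =====
-- Pre_ excludes inputs where Python's int() raises ValueError (in both A and B):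
-- the first token of length > 1, if any, must parse as an int.
def Pre_tsplit (toks : List String) : Prop :=
  ((toks.find? (fun t => decide (PySem.Str.len t > 1))).all
    (fun t => (PySem.Int.ofStr? t).isSome)) = true
instance (toks : List String) : Decidable (Pre_tsplit toks) := by unfold Pre_tsplit; infer_instance
def pvWitness_tsplit : List String := ["[", "15", ",", "3", "]"]

def Spec_tsplit (toks : List String) (out : Bool × List String) : Prop := out = tsplit_alt toks
instance (toks : List String) (out : Bool × List String) : Decidable (Spec_tsplit toks out) := by unfold Spec_tsplit; infer_instance

-- ===== CLAIM (what is proved, stated in full; the proofs are below) =====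
def Claim_equal_tsplit : Prop := ∀ (toks : List String), Dom_tsplit toks → Pre_tsplit toks → Spec_tsplit toks (tsplit toks)

-- ===== LEMMAS AND PROOFS =====
-- the five replacement tokens for a split token (proof-only abbreviation)
def tsplitFive (t : String) : List String :=
  let v := (PySem.Int.ofStr? t).getD 0
  ["[", PySem.Int.toStr (PySem.Int.floordiv v 2), ",",
    PySem.Int.toStr (v - PySem.Int.floordiv v 2), "]"]

theorem tsplitGo_eq_si (toks : List String) :
    tsplitGo toks = (tsplitSi toks).map
      (fun si => toks.take si ++ tsplitFive (toks.getD si "") ++ toks.drop (si + 1)) := by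
  induction toks with
  | nil => simp [tsplitGo, tsplitSi]
  | cons t rest ih =>
    by_cases h : 1 < t.length
    · simp [tsplitGo, tsplitSi, h, tsplitFive]
    · rw [show tsplitGo (t :: rest) = (tsplitGo rest).map (t :: ·) by simp [tsplitGo, h],
        show tsplitSi (t :: rest) = (tsplitSi rest).map (· + 1) by simp [tsplitSi, h], ih]
      cases hsi : tsplitSi rest with
      | none => simp
      | some si => simp [List.take_succ_cons, List.drop_succ_cons]

theorem tsplit_eq_alt (toks : List String) : tsplit toks = tsplit_alt toks := by
  unfold tsplit tsplit_alt
  rw [tsplitGo_eq_si]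
  cases hsi : tsplitSi toks with
  | none => simp
  | some si => simp [tsplitFive]

-- ===== VERDICT (by name: the statement is the Claim_ definition above) =====
theorem tsplit_spec : Claim_equal_tsplit := by
  intro toks _ _
  unfold Spec_tsplit
  exact tsplit_eq_alt toks
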